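-- pv_equiv track=rewrite | github.com/hghyhghy/Codechef-Coding-Ninja | Desktop/DSA/T90/firstuniquecharinstring.py | first_unique_char_in_string
-- ===== SOURCE A (Python) =====
-- def first_unique_char_in_string(string:str)->list[str]:
--     freq={}
--     order=[]
--     result=[]
--
--     for char in string:
--
--         if char in freq:
--
--             freq[char] += 1
--
--         else:
--
--             freq[char] = 1
--             order.append(char)
--
--
--         found=False
--         for char1 in order:
--
--             if freq[char1] == 1:
--
--                 result.append(char1)
--                 found=True
--                 break
--
--
--         if not found:
--
--             result.append("")
--
--
--     return result
-- ===== SOURCE B (Python) =====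
-- def first_unique_char_in_string(string: str) -> list[str]:
--     # Pass 1: record each character's first and second occurrence index, in appearance order.
--     n = len(string)
--     first = {}
--     second = {}
--     order = []
--     for i, ch in enumerate(string):
--         if ch not in first:
--             first[ch] = i
--             order.append(ch)
--         elif ch not in second:
--             second[ch] = i
--     # Pass 2: a pointer into `order` advances monotonically past characters that have
--     # repeated by position i (second occurrence index <= i); it never moves back, since
--     # a repeated character stays repeated.  order[ptr] is the answer when it has appeared.
--     result = []
--     ptr = 0
--     for i in range(n):
--         while ptr < len(order) and second.get(order[ptr], n) <= i:
--             ptr += 1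
--         if ptr < len(order) and first[order[ptr]] <= i:
--             result.append(order[ptr])
--         else:
--             result.append("")
--     return result
-- ===== Notes on version B (the rewrite author's own statement) =====
-- stated objective: faster
-- what changed: Replaces A's per-character rescan of the whole first-appearance list with two passes: one pass records each character's first and second occurrence index, then a sweep whose pointer into the first-appearance order only ever advances past characters whose second occurrence has been reached.
import Mathlib
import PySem

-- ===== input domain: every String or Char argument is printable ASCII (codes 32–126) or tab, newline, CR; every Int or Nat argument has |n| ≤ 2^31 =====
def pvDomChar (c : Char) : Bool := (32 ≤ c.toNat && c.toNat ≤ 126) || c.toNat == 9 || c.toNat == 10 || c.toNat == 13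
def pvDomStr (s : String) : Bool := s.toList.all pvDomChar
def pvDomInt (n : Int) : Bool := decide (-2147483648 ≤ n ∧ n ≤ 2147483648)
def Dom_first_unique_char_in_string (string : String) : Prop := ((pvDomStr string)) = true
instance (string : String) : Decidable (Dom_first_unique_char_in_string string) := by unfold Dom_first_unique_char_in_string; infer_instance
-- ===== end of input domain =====

-- B replaces A's per-character rescan of the first-appearance list by two passes: one pass
-- recording each character's first and second occurrence index, then a sweep whose pointer
-- into the first-appearance order only ever advances (O(n) amortized vs A's O(n^2)).

-- ===== PORT A =====
-- A's inner loop 'for char1 in order: if freq[char1] == 1: …append, break' (none = not found)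
def pvScanA (freq : PySem.Dict Char Int) : List Char → Option Char
  | [] => none
  | c1 :: rest => if freq.getD c1 0 = 1 then some c1 else pvScanA freq rest

def pvStepA (st : PySem.Dict Char Int × List Char × List String) (c : Char) :
    PySem.Dict Char Int × List Char × List String :=
  let freq := if st.1.contains c then st.1.modify c 0 (· + 1) else st.1.insert c 1
  let order := if st.1.contains c then st.2.1 else st.2.1 ++ [c]
  let r : String := match pvScanA freq order with
    | some c1 => String.ofList [c1]
    | none => ""
  (freq, order, st.2.2 ++ [r])

def first_unique_char_in_string (string : String) : List String :=
  (string.toList.foldl pvStepA (PySem.Dict.empty, [], [])).2.2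

-- ===== PORT B =====
-- B's pass 1: 'for i, ch in enumerate(string)', recording first/second occurrence and order
def pvOccStep (st : PySem.Dict Char Int × PySem.Dict Char Int × List Char) (p : Int × Char) :
    PySem.Dict Char Int × PySem.Dict Char Int × List Char :=
  if st.1.contains p.2 then
    if st.2.1.contains p.2 then st else (st.1, st.2.1.insert p.2 p.1, st.2.2)
  else (st.1.insert p.2 p.1, st.2.1, st.2.2 ++ [p.2])

-- B's 'while ptr < len(order) and second.get(order[ptr], n) <= i: ptr += 1'
-- (the pointer is represented by the remaining suffix order[ptr:])
def pvSkip (second : PySem.Dict Char Int) (n i : Int) : List Char → List Char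
  | [] => []
  | c :: rest => if second.getD c n ≤ i then pvSkip second n i rest else c :: rest

-- B's pass 2 body for one i of range(n)
def pvSweepStep (first second : PySem.Dict Char Int) (n : Int)
    (st : List Char × List String) (i : Int) : List Char × List String :=
  let cand := pvSkip second n i st.1
  let r : String := match cand with
    | c :: _ => if first.getD c n ≤ i then String.ofList [c] else ""
    | [] => ""
  (cand, st.2 ++ [r])

def first_unique_char_in_string_alt (string : String) : List String :=
  let l := string.toList
  let n : Int := l.length
  let occ := (PySem.List.enumerate l 0).foldl pvOccStep (PySem.Dict.empty, PySem.Dict.empty, [])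
  ((PySem.List.pyRange 0 n 1).foldl (pvSweepStep occ.1 occ.2.1 n) (occ.2.2, [])).2

-- ===== PRECONDITION & SPEC =====
def Spec_first_unique_char_in_string (string : String) (out : List String) : Prop := out = first_unique_char_in_string_alt string
instance (string : String) (out : List String) : Decidable (Spec_first_unique_char_in_string string out) := by unfold Spec_first_unique_char_in_string; infer_instance

-- ===== CLAIM (what is proved, stated in full; the proofs are below) =====
def Claim_equal_first_unique_char_in_string : Prop := ∀ (string : String), Dom_first_unique_char_in_string string → Spec_first_unique_char_in_string string (first_unique_char_in_string string)

-- ===== LEMMAS AND PROOFS =====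

-- the counting dict A's loop builds
def pvCount (p : List Char) : PySem.Dict Char Int :=
  p.foldl (fun d x => d.insert x (d.getD x 0 + 1)) PySem.Dict.empty

lemma pvCount_getD (p : List Char) (v : Char) : (pvCount p).getD v 0 = (p.count v : Int) := by
  simpa using PySem.Dict.getD_foldl_insert_add_one p PySem.Dict.empty v

lemma pvCount_contains (p : List Char) (c : Char) :
    (pvCount p).contains c = decide (c ∈ p) := by
  rw [pvCount, PySem.Dict.contains_eq_decide_mem_keys, PySem.Dict.keys_foldl_insert]
  simp [pysem]

lemma pvCount_append (p : List Char) (c : Char) :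
    pvCount (p ++ [c]) = (pvCount p).insert c ((pvCount p).getD c 0 + 1) := by
  simp [pvCount]

-- the per-prefix answer both programs produce for the processed prefix p
def pvFirstU (p : List Char) : String :=
  match pvScanA (pvCount p) (PySem.List.dedup p) with
  | some c1 => String.ofList [c1]
  | none => ""

lemma pvScanA_append (f : PySem.Dict Char Int) (l1 l2 : List Char)
    (h : ∀ y ∈ l1, ¬ f.getD y 0 = 1) : pvScanA f (l1 ++ l2) = pvScanA f l2 := by
  induction l1 with
  | nil => rfl
  | cons a t ih =>
    simp only [List.cons_append, pvScanA]
    rw [if_neg (h a (by simp))]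
    exact ih (fun y hy => h y (by simp [hy]))

lemma pvDedup_append (p : List Char) (c : Char) :
    PySem.List.dedup (p ++ [c])
      = if c ∈ p then PySem.List.dedup p else PySem.List.dedup p ++ [c] := by
  by_cases hc : c ∈ p <;> simp [pysem, PySem.Set.add, hc]

lemma pvStepA_eq (p : List Char) (res : List String) (c : Char) :
    pvStepA (pvCount p, PySem.List.dedup p, res) c
      = (pvCount (p ++ [c]), PySem.List.dedup (p ++ [c]), res ++ [pvFirstU (p ++ [c])]) := by
  have hmod : (pvCount p).modify c 0 (· + 1) = (pvCount p).insert c ((pvCount p).getD c 0 + 1) := by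
    simp [PySem.Dict.modify]
  by_cases hc : c ∈ p
  · simp only [pvStepA, pvCount_contains p c, hc, decide_true, if_true, hmod,
      ← pvCount_append, pvDedup_append, pvFirstU]
  · have h0 : (pvCount p).getD c 0 = 0 := by
      rw [pvCount_getD]; simp [List.count_eq_zero.mpr hc]
    simp only [pvStepA, pvCount_contains p c, hc, decide_false, Bool.false_eq_true, if_false,
      pvDedup_append, pvFirstU]
    rw [pvCount_append, h0, zero_add]

-- A's fold produces the per-prefix answers
def pvOuts (l : List Char) : List String :=
  (List.range l.length).map (fun j => pvFirstU (l.take (j + 1)))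

lemma pvOuts_append (l : List Char) (c : Char) :
    pvOuts (l ++ [c]) = pvOuts l ++ [pvFirstU (l ++ [c])] := by
  simp only [pvOuts, List.length_append, List.length_cons, List.length_nil, zero_add,
    List.range_succ, List.map_append, List.map_cons, List.map_nil]
  congr 1
  · apply List.map_congr_left
    intro j hj
    rw [List.take_append_of_le_length]
    simp only [List.mem_range] at hj
    omega
  · rw [List.take_of_length_le (by simp)]

lemma pvStateA (l : List Char) :
    l.foldl pvStepA (PySem.Dict.empty, [], [])
      = (pvCount l, PySem.List.dedup l, pvOuts l) := by
  induction l using List.reverseRecOn with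
  | nil => rfl
  | append_singleton l c ih =>
    rw [List.foldl_append, ih, List.foldl_cons, List.foldl_nil, pvStepA_eq, pvOuts_append]

-- B's pass 1 invariant
lemma pvMem_of_mem_dedup (p : List Char) (y : Char) (hy : y ∈ PySem.List.dedup p) : y ∈ p := by
  simpa [pysem] using hy

def pvInv1 (l : List Char) (st : PySem.Dict Char Int × PySem.Dict Char Int × List Char) : Prop :=
  st.2.2 = PySem.List.dedup l ∧
  (∀ c, st.1.get? c = if c ∈ l then some (l.idxOf c : Int) else none) ∧
  (∀ c, st.2.1.contains c = decide (2 ≤ l.count c)) ∧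
  (∀ c (i : Nat), (∃ j, st.2.1.get? c = some j ∧ j ≤ (i : Int)) ↔ 2 ≤ (l.take (i + 1)).count c)

lemma pvCountTake_le (l : List Char) (m : Nat) (c : Char) :
    (l.take m).count c ≤ l.count c :=
  (List.take_sublist m l).count_le c

lemma pvTakeAppend_count (l : List Char) (c c' : Char) (i : Nat) :
    ((l ++ [c]).take (i + 1)).count c'
      = (l.take (i + 1)).count c' + (if c' = c ∧ l.length ≤ i then 1 else 0) := by
  rw [List.take_append, List.count_append]
  congr 1
  by_cases hi : l.length ≤ i
  · have : i + 1 - l.length = (i - l.length) + 1 := by omega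
    rw [this]
    by_cases e : c' = c
    · subst e; simp [hi]
    · simp [hi, e, Ne.symm e]
  · have : i + 1 - l.length = 0 := by omega
    simp [this, hi]

lemma pvInv1_holds (l : List Char) :
    pvInv1 l ((PySem.List.enumerate l 0).foldl pvOccStep
      (PySem.Dict.empty, PySem.Dict.empty, [])) := by
  induction l using List.reverseRecOn with
  | nil =>
    refine ⟨rfl, ?_, ?_, ?_⟩ <;> simp [pysem]
  | append_singleton l c ih =>
    obtain ⟨h1, h2, h3, h5⟩ := ih
    rw [PySem.List.enumerate_append, List.foldl_append, PySem.List.enumerate_cons,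
      PySem.List.enumerate_nil, List.foldl_cons, List.foldl_nil]
    set st := (PySem.List.enumerate l 0).foldl pvOccStep
      (PySem.Dict.empty, PySem.Dict.empty, []) with hst
    by_cases hc : c ∈ l
    · have hcont : st.1.contains c = true := by
        rw [PySem.Dict.contains_eq_isSome_get?, h2 c, if_pos hc]; rfl
      by_cases h2c : 2 ≤ l.count c
      · have hscont : st.2.1.contains c = true := by rw [h3 c]; exact decide_eq_true h2c
        have hstep : pvOccStep st ((0 : Int) + (l.length : Int), c) = st := by
          simp only [pvOccStep, hcont, hscont, if_true]
        rw [hstep]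
        refine ⟨?_, ?_, ?_, ?_⟩
        · rw [h1, pvDedup_append, if_pos hc]
        · intro c'
          rw [h2 c']
          by_cases hc' : c' ∈ l
          · rw [if_pos hc', if_pos (by simp [hc']), List.idxOf_append_of_mem hc']
          · have hne : c' ≠ c := fun e => hc' (e ▸ hc)
            rw [if_neg hc', if_neg (by simp [hc', hne])]
        · intro c'
          rw [h3 c']
          by_cases e : c' = c
          · subst e
            have : (l ++ [c']).count c' = l.count c' + 1 := by
              simp [List.count_append]
            rw [this]
            apply decide_eq_decide.mpr
            omega
          · have : (l ++ [c]).count c' = l.count c' := by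
              simp [List.count_append, Ne.symm e]
            rw [this]
        · intro c' i
          rw [pvTakeAppend_count]
          by_cases e : c' = c
          · subst e
            by_cases hi : l.length ≤ i
            · have htk : l.take (i + 1) = l := List.take_of_length_le (by omega)
              have hIH := h5 c' i
              rw [htk] at hIH
              rw [htk]
              constructor
              · intro _
                split_ifs <;> omega
              · intro _
                exact hIH.mpr h2c
            · simp only [hi, and_false, if_false, add_zero]
              exact h5 c' i
          · simp only [e, false_and, if_false, add_zero]
            exact h5 c' i
      · have hscont : st.2.1.contains c = false := by
          rw [h3 c]; exact decide_eq_false h2c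
        have hcnt1 : l.count c = 1 := by
          have := List.count_pos_iff.mpr hc
          omega
        have hstep : pvOccStep st ((0 : Int) + (l.length : Int), c)
            = (st.1, st.2.1.insert c ((0 : Int) + (l.length : Int)), st.2.2) := by
          simp only [pvOccStep, hcont, hscont, if_true, Bool.false_eq_true, if_false]
        rw [hstep]
        refine ⟨?_, ?_, ?_, ?_⟩
        · exact h1.trans (by rw [pvDedup_append, if_pos hc])
        · intro c'
          rw [h2 c']
          by_cases hc' : c' ∈ l
          · rw [if_pos hc', if_pos (by simp [hc']), List.idxOf_append_of_mem hc']
          · have hne : c' ≠ c := fun e => hc' (e ▸ hc)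
            rw [if_neg hc', if_neg (by simp [hc', hne])]
        · intro c'
          rw [PySem.Dict.contains_insert, h3 c']
          by_cases e : c' = c
          · subst e
            have : (l ++ [c']).count c' = 2 := by
              simp [List.count_append, hcnt1]
            simp [this]
          · have : (l ++ [c]).count c' = l.count c' := by
              simp [List.count_append, Ne.symm e]
            simp [this, e]
        · intro c' i
          rw [pvTakeAppend_count]
          by_cases e : c' = c
          · subst e
            simp only [PySem.Dict.get?_insert]
            constructor
            · rintro ⟨j, hj, hji⟩
              cases hj
              have hi : l.length ≤ i := by omega
              have htk : l.take (i + 1) = l := List.take_of_length_le (by omega)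
              rw [htk]
              simp [hi, hcnt1]
            · intro hcount
              by_cases hi : l.length ≤ i
              · exact ⟨_, rfl, by omega⟩
              · exfalso
                rw [if_neg (by simp [hi]), add_zero] at hcount
                have := pvCountTake_le l (i + 1) c'
                omega
          · simp only [PySem.Dict.get?_insert, e, false_and, if_false, add_zero]
            exact h5 c' i
    · have hcont : st.1.contains c = false := by
        rw [PySem.Dict.contains_eq_isSome_get?, h2 c, if_neg hc]; rfl
      have hcnt0 : l.count c = 0 := List.count_eq_zero.mpr hc
      have hstep : pvOccStep st ((0 : Int) + (l.length : Int), c)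
          = (st.1.insert c ((0 : Int) + (l.length : Int)), st.2.1, st.2.2 ++ [c]) := by
        simp only [pvOccStep, hcont, Bool.false_eq_true, if_false]
      rw [hstep]
      refine ⟨?_, ?_, ?_, ?_⟩
      · rw [h1, pvDedup_append, if_neg hc]
      · intro c'
        rw [PySem.Dict.get?_insert]
        by_cases e : c' = c
        · subst e
          have hidx : (l ++ [c']).idxOf c' = l.length := by
            rw [List.idxOf_append_of_notMem hc]
            simp
          rw [if_pos rfl, if_pos (by simp), hidx]
          norm_num
        · rw [if_neg e, h2 c']
          by_cases hc' : c' ∈ l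
          · rw [if_pos hc', if_pos (by simp [hc']), List.idxOf_append_of_mem hc']
          · rw [if_neg hc', if_neg (by simp [hc', e])]
      · intro c'
        rw [h3 c']
        by_cases e : c' = c
        · subst e
          have : (l ++ [c']).count c' = 1 := by simp [List.count_append, hcnt0]
          simp [this, hcnt0]
        · have : (l ++ [c]).count c' = l.count c' := by
            simp [List.count_append, Ne.symm e]
          rw [this]
      · intro c' i
        rw [pvTakeAppend_count]
        by_cases e : c' = c
        · subst e
          have hnone : st.2.1.get? c' = none := by
            rw [PySem.Dict.get?_eq_none_iff_contains, h3 c']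
            simp [hcnt0]
          constructor
          · rintro ⟨j, hj, _⟩
            rw [hnone] at hj
            cases hj
          · intro hcount
            exfalso
            have := pvCountTake_le l (i + 1) c'
            split_ifs at hcount <;> omega
        · simp only [e, false_and, if_false, add_zero]
          exact h5 c' i

-- B's while loop: it drops a block of repeated candidates and stops at the first survivor
lemma pvSkip_spec (f : PySem.Dict Char Int) (n i : Int) (xs : List Char) :
    ∃ t, xs = t ++ pvSkip f n i xs ∧ (∀ y ∈ t, f.getD y n ≤ i) ∧
      (∀ c1 t1, pvSkip f n i xs = c1 :: t1 → ¬ f.getD c1 n ≤ i) := by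
  induction xs with
  | nil => exact ⟨[], rfl, by simp, by simp [pvSkip]⟩
  | cons a rest ih =>
    by_cases ha : f.getD a n ≤ i
    · obtain ⟨t, h1, h2, h3⟩ := ih
      refine ⟨a :: t, ?_, ?_, ?_⟩
      · simp only [pvSkip, if_pos ha, List.cons_append]
        rw [← h1]
      · intro y hy
        rcases List.mem_cons.mp hy with rfl | hy
        · exact ha
        · exact h2 y hy
      · intro c1 t1 h
        rw [pvSkip, if_pos ha] at h
        exact h3 c1 t1 h
    · refine ⟨[], ?_, by simp, ?_⟩
      · simp [pvSkip, if_neg ha]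
      · intro c1 t1 h
        rw [pvSkip, if_neg ha] at h
        cases h
        exact ha

-- dedup of a prefix is a prefix of dedup
lemma pvDedup_prefix (p q : List Char) :
    PySem.List.dedup p <+: PySem.List.dedup (p ++ q) := by
  induction q using List.reverseRecOn with
  | nil => simp
  | append_singleton q c ih =>
    rw [← List.append_assoc, pvDedup_append]
    split_ifs
    · exact ih
    · exact ih.trans (List.prefix_append _ _)

-- B's sweep produces the per-prefix answers
lemma pvSweep (l : List Char) (F S : PySem.Dict Char Int)
    (hF : ∀ c, F.get? c = if c ∈ l then some (l.idxOf c : Int) else none)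
    (hS : ∀ c (i : Nat), (∃ j, S.get? c = some j ∧ j ≤ (i : Int)) ↔ 2 ≤ (l.take (i + 1)).count c) :
    ∀ (m k : Nat) (res : List String), m ≤ l.length → k ≤ (PySem.List.dedup l).length →
      (∀ y ∈ (PySem.List.dedup l).take k, 2 ≤ (l.take m).count y) →
      ((PySem.List.pyRange (m : Int) (l.length : Int) 1).foldl
          (pvSweepStep F S (l.length : Int)) ((PySem.List.dedup l).drop k, res)).2
        = res ++ (List.range' m (l.length - m)).map (fun j => pvFirstU (l.take (j + 1))) := by
  have key : ∀ (fuel m k : Nat) (res : List String), l.length - m = fuel →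
      m ≤ l.length → k ≤ (PySem.List.dedup l).length →
      (∀ y ∈ (PySem.List.dedup l).take k, 2 ≤ (l.take m).count y) →
      ((PySem.List.pyRange (m : Int) (l.length : Int) 1).foldl
          (pvSweepStep F S (l.length : Int)) ((PySem.List.dedup l).drop k, res)).2
        = res ++ (List.range' m (l.length - m)).map (fun j => pvFirstU (l.take (j + 1))) := by
    intro fuel
    induction fuel with
    | zero =>
      intro m k res hfuel hm hk hinv
      have hm' : m = l.length := by omega
      subst hm'
      simp [PySem.List.pyRange]
    | succ fuel ih =>
      intro m k res hfuel hm hk hinv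
      have hmlt : m < l.length := by omega
      set D := PySem.List.dedup l with hDdef
      have hnodup : D.Nodup := PySem.List.nodup_dedup l
      rw [PySem.List.pyRange_one_cons (by exact_mod_cast hmlt), List.foldl_cons]
      -- the while loop drops the block t of repeated candidates
      obtain ⟨t, ht, htle, hhead⟩ := pvSkip_spec S (l.length : Int) (m : Int) (D.drop k)
      set cand := pvSkip S (l.length : Int) (m : Int) (D.drop k) with hcanddef
      set k' := k + t.length with hk'def
      have hk' : k' ≤ D.length := by
        have := congrArg List.length ht
        simp only [List.length_drop, List.length_append] at this
        omega
      have hcand : cand = D.drop k' := by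
        rw [hk'def, ← List.drop_drop, ht, List.drop_left]
      have htake' : D.take k' = D.take k ++ t := by
        rw [hk'def, List.take_add, ht, List.take_left]
      -- the invariant advances from m to m + 1
      have hpref : l.take m <+: l.take (m + 1) := by
        have := List.take_prefix m (l.take (m + 1))
        rwa [List.take_take, min_eq_left (by omega)] at this
      have hinv' : ∀ y ∈ D.take k', 2 ≤ (l.take (m + 1)).count y := by
        intro y hy
        rw [htake', List.mem_append] at hy
        rcases hy with hy | hy
        · exact le_trans (hinv y hy) (hpref.sublist.count_le y)
        · have hle := htle y hy
          cases hyS : S.get? y with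
          | none =>
            rw [PySem.Dict.getD_of_get?_eq_none _ _ hyS] at hle
            exfalso
            have : (l.length : Int) ≤ (m : Int) := hle
            omega
          | some j =>
            rw [PySem.Dict.getD_of_get?_eq_some _ _ hyS] at hle
            exact (hS y m).mp ⟨j, hyS, hle⟩
      -- the produced answer is the per-prefix answer
      set p := l.take (m + 1) with hpdef
      have hppre : PySem.List.dedup p <+: D := by
        have := pvDedup_prefix p (l.drop (m + 1))
        rwa [List.take_append_drop] at this
      set Dp := PySem.List.dedup p with hDpdef
      have hDp : Dp = D.take Dp.length := List.prefix_iff_eq_take.mp hppre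
      have hscan_none : (∀ y ∈ Dp, 2 ≤ p.count y) → pvScanA (pvCount p) Dp = none := by
        intro hall
        have := pvScanA_append (pvCount p) Dp [] (fun y hy => by
          rw [pvCount_getD]
          have := hall y hy
          intro hbad
          have : p.count y = 1 := by exact_mod_cast hbad
          omega)
        rw [List.append_nil] at this
        rw [this]
        rfl
      have hstep : pvSweepStep F S (l.length : Int) (D.drop k, res) (m : Int)
          = (D.drop k', res ++ [pvFirstU p]) := by
        cases hce : D.drop k' with
        | nil =>
          have hlek' : D.length ≤ k' := List.drop_eq_nil_iff.mp hce
          have hall : ∀ y ∈ Dp, 2 ≤ p.count y := by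
            intro y hy
            apply hinv' y
            rw [List.take_of_length_le (by omega)]
            exact hppre.sublist.subset hy
          have hfU : pvFirstU p = "" := by
            unfold pvFirstU
            rw [hscan_none hall]
          simp only [pvSweepStep, ← hcanddef, hcand, hce, hfU]
        | cons c1 rest =>
          have hk'lt : k' < D.length := by
            by_contra hle
            rw [List.drop_eq_nil_iff.mpr (by omega)] at hce
            cases hce
          have hgetc1 : D[k']'hk'lt = c1 := by
            have h0 : (D.drop k')[0]? = some c1 := by rw [hce]; rfl
            rw [List.getElem?_drop, Nat.add_zero] at h0
            obtain ⟨hb, hval⟩ := List.getElem?_eq_some_iff.mp h0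
            exact hval
          have hidxD : List.idxOf c1 D = k' := by
            rw [← hgetc1]
            exact hnodup.idxOf_getElem k' hk'lt
          have hc1D : c1 ∈ D := by
            rw [← hgetc1]
            exact List.getElem_mem hk'lt
          have hc1l : c1 ∈ l := pvMem_of_mem_dedup l c1 hc1D
          have hn1 : ¬ S.getD c1 (l.length : Int) ≤ (m : Int) := hhead c1 rest (hcand.trans hce)
          have hcle : ¬ 2 ≤ p.count c1 := by
            intro h2
            obtain ⟨j, hj, hjm⟩ := (hS c1 m).mpr h2
            exact hn1 (by rw [PySem.Dict.getD_of_get?_eq_some _ _ hj]; exact hjm)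
          have hFg : F.getD c1 (l.length : Int) = (List.idxOf c1 l : Int) := by
            rw [PySem.Dict.getD_eq_get?_getD, hF c1, if_pos hc1l]
            rfl
          by_cases hcm : c1 ∈ p
          · have hidxle : List.idxOf c1 l < m + 1 := (List.mem_take_iff_idxOf_lt hc1l).mp hcm
            have hcond : F.getD c1 (l.length : Int) ≤ (m : Int) := by
              rw [hFg]
              exact_mod_cast Nat.lt_succ_iff.mp hidxle
            have hcnt1 : p.count c1 = 1 := by
              have := List.count_pos_iff.mpr hcm
              omega
            have hmemDp : c1 ∈ Dp := by
              rw [hDpdef]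
              simpa [pysem] using hcm
            have hk'ltDp : k' < Dp.length := by
              have := (List.mem_take_iff_idxOf_lt hc1D).mp (hDp ▸ hmemDp)
              rwa [hidxD] at this
            have hDpsplit : Dp = D.take k' ++ c1 :: rest.take (Dp.length - k' - 1) := by
              conv_lhs => rw [hDp, show Dp.length = k' + (Dp.length - k') by omega]
              rw [List.take_add, hce, List.take_cons (by omega)]
            have hsc : pvScanA (pvCount p) Dp = some c1 := by
              rw [hDpsplit, pvScanA_append (pvCount p) _ _ (fun y hy => by
                rw [pvCount_getD]
                have := hinv' y hy
                intro hbad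
                have : p.count y = 1 := by exact_mod_cast hbad
                omega)]
              simp only [pvScanA]
              rw [if_pos (by rw [pvCount_getD, hcnt1]; rfl)]
            have hfU : pvFirstU p = String.ofList [c1] := by
              unfold pvFirstU
              rw [hsc]
            simp only [pvSweepStep, ← hcanddef, hcand, hce, hfU, hcond, if_true]
          · have hidxgt : ¬ List.idxOf c1 l < m + 1 :=
              fun hlt => hcm ((List.mem_take_iff_idxOf_lt hc1l).mpr hlt)
            have hcond : ¬ F.getD c1 (l.length : Int) ≤ (m : Int) := by
              rw [hFg]
              intro hle
              have : List.idxOf c1 l ≤ m := by exact_mod_cast hle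
              exact hidxgt (by omega)
            have hnotDp : c1 ∉ Dp := by
              rw [hDpdef]
              simpa [pysem] using hcm
            have hDple : Dp.length ≤ k' := by
              by_contra hgt
              refine hnotDp (hDp ▸ ((List.mem_take_iff_idxOf_lt hc1D).mpr ?_))
              rw [hidxD]
              omega
            have hall : ∀ y ∈ Dp, 2 ≤ p.count y := by
              intro y hy
              apply hinv' y
              have hDp2 : Dp = (D.take k').take Dp.length := by
                rw [List.take_take, min_eq_left hDple, ← hDp]
              exact List.mem_of_mem_take (hDp2 ▸ hy)
            have hfU : pvFirstU p = "" := by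
              unfold pvFirstU
              rw [hscan_none hall]
            simp only [pvSweepStep, ← hcanddef, hcand, hce, hfU, hcond, if_false]
      rw [hstep, show ((m : Int) + 1) = (((m + 1 : Nat)) : Int) by push_cast; ring,
        ih (m + 1) k' (res ++ [pvFirstU p]) (by omega) (by omega) hk' hinv']
      rw [show l.length - m = (l.length - (m + 1)) + 1 by omega, List.range'_succ,
        List.map_cons, List.append_assoc, List.singleton_append]
  intro m k res hm hk hinv
  exact key (l.length - m) m k res rfl hm hk hinv

-- ===== VERDICT (by name: the statement is the Claim_ definition above) =====
theorem first_unique_char_in_string_spec : Claim_equal_first_unique_char_in_string := by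
  intro s _
  unfold Spec_first_unique_char_in_string first_unique_char_in_string first_unique_char_in_string_alt
  obtain ⟨h1, h2, h3, h5⟩ := pvInv1_holds s.toList
  rw [pvStateA]
  set occ := (PySem.List.enumerate s.toList 0).foldl pvOccStep
    (PySem.Dict.empty, PySem.Dict.empty, []) with hocc
  show pvOuts s.toList = ((PySem.List.pyRange 0 (s.toList.length : Int) 1).foldl
      (pvSweepStep occ.1 occ.2.1 (s.toList.length : Int)) (occ.2.2, [])).2
  have hsw := pvSweep s.toList occ.1 occ.2.1 h2 h5 0 0 []
    (Nat.zero_le _) (Nat.zero_le _) (by simp)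
  rw [Nat.cast_zero, List.drop_zero] at hsw
  rw [h1, hsw]
  simp [pvOuts, List.range_eq_range']
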